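-- pv_equiv track=rewrite | github.com/nbars/fuzzing-concurrency-benchmark | eval.py | order_for_fast_exploration
-- ===== SOURCE A (Python) =====
-- import typing as t
--
-- def order_for_fast_exploration(data: t.List[int]) -> t.List[int]:
--     assert len(data) >= 3
--     data = sorted(data.copy())
--     result = [data[0], data[-1], data[len(data) // 2]]
--     queue = [(0, len(data) // 2), (len(data) // 2, len(data) - 1)]
--
--     while queue:
--         start, end = queue.pop(0)
--         if end - start > 1:
--             mid = (start + end) // 2
--             result.append(data[mid])
--             queue.append((start, mid))
--             queue.append((mid, end))
--
--     return result
-- ===== SOURCE B (Python) =====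
-- def order_for_fast_exploration(data):
--     assert len(data) >= 3
--     data = sorted(data)
--     mid = len(data) // 2
--
--     def merge(a, b):
--         # combine two level-lists, concatenating levels of equal depth
--         if not a:
--             return b
--         if not b:
--             return a
--         return [a[0] + b[0]] + merge(a[1:], b[1:])
--
--     def levels(s, e):
--         # per-depth lists of values emitted inside interval (s, e):
--         # its midpoint at depth 0, then the merged levels of its two halves
--         if e - s <= 1:
--             return []
--         m = (s + e) // 2
--         return [[data[m]]] + merge(levels(s, m), levels(m, e))
--
--     result = [data[0], data[-1], data[mid]]
--     for level in merge(levels(0, mid), levels(mid, len(data) - 1)):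
--         result += level
--     return result
-- ===== Notes on version B (the rewrite author's own statement) =====
-- stated objective: faster
-- what changed: Replaces A's iterative FIFO-queue BFS (list.pop(0) shifting the queue each dequeue) by a recursive divide-and-conquer: each interval recursively produces its per-depth level lists, sibling level lists are zipped together with a merge, and the merged levels are flattened onto the seed.
import Mathlib
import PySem

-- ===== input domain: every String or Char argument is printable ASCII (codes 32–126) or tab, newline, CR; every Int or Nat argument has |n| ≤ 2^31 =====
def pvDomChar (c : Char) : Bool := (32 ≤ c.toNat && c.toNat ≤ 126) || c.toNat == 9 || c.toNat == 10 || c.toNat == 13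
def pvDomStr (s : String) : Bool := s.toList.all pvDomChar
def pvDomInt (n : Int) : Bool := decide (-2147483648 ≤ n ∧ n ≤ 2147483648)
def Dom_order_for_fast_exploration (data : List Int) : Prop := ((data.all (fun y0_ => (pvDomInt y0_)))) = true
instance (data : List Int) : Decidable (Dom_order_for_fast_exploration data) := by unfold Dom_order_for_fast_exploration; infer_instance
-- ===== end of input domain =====

-- B replaces A's iterative FIFO-queue breadth-first loop by a recursive
-- divide-and-conquer that builds per-depth level lists and merges siblings.

-- ===== PORT A =====

-- fuel bound for A's loop: each iteration strictly decreases this quantity (proved in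
-- pvMu_children below), so starting the fueled loop with pvMu of the initial queue is exact.
def pvMu (Q : List (Nat × Nat)) : Nat := (Q.map (fun p => 3 * (p.2 - p.1 - 1))).sum + Q.length

-- the 'while queue' loop of A: pop from the front, append children at the back.
-- The fuel argument only makes the recursion structural; it is never exhausted
-- when the loop starts with pvMu fuel.
def loopA (d : List Int) : Nat → List (Nat × Nat) → List Int
  | 0, _ => []
  | _ + 1, [] => []
  | fuel + 1, (s, e) :: rest =>
    if e - s > 1 then
      d.getD ((s + e) / 2) 0 :: loopA d fuel (rest ++ [(s, (s + e) / 2), ((s + e) / 2, e)])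
    else loopA d fuel rest

def order_for_fast_exploration (data : List Int) : List Int :=
  -- 'assert len(data) >= 3' raises AssertionError on shorter input; excluded by Pre_
  if data.length < 3 then [] else
  let d := PySem.List.sorted data (fun x => x) false
  let n := d.length
  [d.getD 0 0, d.getD (n - 1) 0, d.getD (n / 2) 0] ++
    loopA d (pvMu [(0, n / 2), (n / 2, n - 1)]) [(0, n / 2), (n / 2, n - 1)]

-- ===== PORT B =====

-- Source B's merge: combine two level-lists, concatenating levels of equal depth
def pvMerge : List (List Int) → List (List Int) → List (List Int)
  | [], ys => ys
  | xs, [] => xs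
  | x :: xs, y :: ys => (x ++ y) :: pvMerge xs ys

-- Source B's levels: per-depth lists of the values emitted inside interval (s, e)
def levB (d : List Int) (s e : Nat) : List (List Int) :=
  if e - s ≤ 1 then []
  else [d.getD ((s + e) / 2) 0] :: pvMerge (levB d s ((s + e) / 2)) (levB d ((s + e) / 2) e)
termination_by e - s
decreasing_by all_goals omega

def order_for_fast_exploration_alt (data : List Int) : List Int :=
  -- 'assert len(data) >= 3' raises AssertionError on shorter input; excluded by Pre_
  if data.length < 3 then [] else
  let d := PySem.List.sorted data (fun x => x) false
  let mid := d.length / 2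
  [d.getD 0 0, d.getD (d.length - 1) 0, d.getD mid 0] ++
    (pvMerge (levB d 0 mid) (levB d mid (d.length - 1))).flatten

-- ===== PRECONDITION & SPEC =====
-- A asserts len(data) >= 3 and raises AssertionError below that; Pre_ excludes exactly those inputs.
def Pre_order_for_fast_exploration (data : List Int) : Prop := 3 ≤ data.length
instance (data : List Int) : Decidable (Pre_order_for_fast_exploration data) := by
  unfold Pre_order_for_fast_exploration; infer_instance
def pvWitness_order_for_fast_exploration : List Int := [2, 1, 3]

def Spec_order_for_fast_exploration (data : List Int) (out : List Int) : Prop := out = order_for_fast_exploration_alt data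
instance (data : List Int) (out : List Int) : Decidable (Spec_order_for_fast_exploration data out) := by unfold Spec_order_for_fast_exploration; infer_instance

-- ===== CLAIM (what is proved, stated in full; the proofs are below) =====
def Claim_equal_order_for_fast_exploration : Prop := ∀ (data : List Int), Dom_order_for_fast_exploration data → Pre_order_for_fast_exploration data → Spec_order_for_fast_exploration data (order_for_fast_exploration data)

-- ===== LEMMAS AND PROOFS =====

-- the values one BFS level emits, in order
def pvEmit (d : List Int) (L : List (Nat × Nat)) : List Int :=
  L.flatMap (fun p => if p.2 - p.1 > 1 then [d.getD ((p.1 + p.2) / 2) 0] else [])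

-- the intervals one BFS level hands to the next
def pvChildren (L : List (Nat × Nat)) : List (Nat × Nat) :=
  L.flatMap (fun p => if p.2 - p.1 > 1 then [(p.1, (p.1 + p.2) / 2), ((p.1 + p.2) / 2, p.2)] else [])

-- the level-lists of a whole forest of intervals (B's merge, folded)
def levForest (d : List Int) (Q : List (Nat × Nat)) : List (List Int) :=
  Q.foldr (fun p acc => pvMerge (levB d p.1 p.2) acc) []

def pvHd : List (List Int) → List Int
  | [] => []
  | x :: _ => x

def pvTl : List (List Int) → List (List Int)
  | [] => []
  | _ :: xs => xs

theorem pvMerge_nil_right (xs : List (List Int)) : pvMerge xs [] = xs := by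
  cases xs <;> rfl

theorem pvHd_merge (A B : List (List Int)) : pvHd (pvMerge A B) = pvHd A ++ pvHd B := by
  cases A <;> cases B <;> simp [pvMerge, pvHd]

theorem pvTl_merge (A B : List (List Int)) : pvTl (pvMerge A B) = pvMerge (pvTl A) (pvTl B) := by
  cases A <;> cases B <;> simp [pvMerge, pvTl, pvMerge_nil_right]

theorem pvMerge_assoc (A B C : List (List Int)) :
    pvMerge (pvMerge A B) C = pvMerge A (pvMerge B C) := by
  induction A generalizing B C with
  | nil => rfl
  | cons a A ih =>
    cases B <;> cases C <;> simp [pvMerge, pvMerge_nil_right, ih]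

theorem flatten_hd_tl (L : List (List Int)) : L.flatten = pvHd L ++ (pvTl L).flatten := by
  cases L <;> simp [pvHd, pvTl]

theorem levForest_hd_tl (d : List Int) (Q : List (Nat × Nat)) :
    pvHd (levForest d Q) = pvEmit d Q ∧
    pvTl (levForest d Q) = levForest d (pvChildren Q) := by
  induction Q with
  | nil => simp [levForest, pvEmit, pvChildren, pvHd, pvTl]
  | cons p Q ih =>
    obtain ⟨s, e⟩ := p
    obtain ⟨ih1, ih2⟩ := ih
    have hlev : levForest d ((s, e) :: Q) = pvMerge (levB d s e) (levForest d Q) := rfl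
    by_cases h : e - s > 1
    · rw [levB] at hlev
      rw [if_neg (by omega)] at hlev
      constructor
      · rw [hlev, pvHd_merge, ih1]
        simp [pvEmit, pvHd, List.flatMap_cons, if_pos h]
      · rw [hlev, pvTl_merge, ih2]
        simp only [pvTl]
        simp only [pvChildren, List.flatMap_cons, if_pos h]
        show pvMerge (pvMerge (levB d s ((s+e)/2)) (levB d ((s+e)/2) e)) _ = _
        rw [pvMerge_assoc]
        rfl
    · rw [levB] at hlev
      rw [if_pos (by omega)] at hlev
      simp only [hlev]
      show pvHd (pvMerge [] _) = _ ∧ pvTl (pvMerge [] _) = _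
      simp only [pvMerge]
      constructor
      · rw [ih1]; simp [pvEmit, List.flatMap_cons, if_neg h]
      · rw [ih2]; simp [pvChildren, List.flatMap_cons, if_neg h]

-- A's FIFO loop pops each element of the front segment Q exactly once (one unit of fuel
-- each), emits pvEmit d Q, and leaves exactly the children of Q queued behind C.
theorem loopA_steps (d : List Int) (Q : List (Nat × Nat)) :
    ∀ (C : List (Nat × Nat)) (f : Nat),
      loopA d (f + Q.length) (Q ++ C) = pvEmit d Q ++ loopA d f (C ++ pvChildren Q) := by
  induction Q with
  | nil => intro C f; simp [pvEmit, pvChildren]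
  | cons p Q ih =>
    intro C f
    obtain ⟨s, e⟩ := p
    rw [List.cons_append, List.length_cons, show f + (Q.length + 1) = (f + Q.length) + 1 by omega,
      loopA]
    by_cases h : e - s > 1
    · simp only [if_pos h]
      rw [show Q ++ C ++ [(s, (s + e) / 2), ((s + e) / 2, e)]
            = Q ++ (C ++ [(s, (s + e) / 2), ((s + e) / 2, e)]) by simp, ih]
      simp [pvEmit, pvChildren, if_pos h, List.flatMap_cons]
    · simp only [if_neg h]
      rw [ih]
      simp [pvEmit, pvChildren, if_neg h, List.flatMap_cons]

theorem pvMu_children (L : List (Nat × Nat)) : pvMu (pvChildren L) + L.length ≤ pvMu L := by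
  induction L with
  | nil => simp [pvMu, pvChildren]
  | cons p L ih =>
    simp only [pvMu, pvChildren, List.flatMap_cons, List.map_append, List.sum_append,
      List.length_append, List.map_cons, List.sum_cons, List.length_cons] at *
    split <;> simp_all
    all_goals omega

-- with at least pvMu fuel, A's dequeue loop emits exactly the flattened level-lists
theorem loopA_eq_flatten (d : List Int) : ∀ (N : Nat) (Q : List (Nat × Nat)) (f : Nat),
    pvMu Q ≤ N → pvMu Q ≤ f → loopA d f Q = (levForest d Q).flatten := by
  intro N
  induction N with
  | zero =>
    intro Q f h _
    match Q with
    | [] => cases f <;> rfl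
    | q :: qs => simp [pvMu] at h
  | succ N ih =>
    intro Q f hN hf
    match Q with
    | [] => cases f <;> rfl
    | q :: qs =>
      have hmu := pvMu_children (q :: qs)
      have hlen : (q :: qs).length ≤ pvMu (q :: qs) := by simp [pvMu]
      simp only [List.length_cons] at hmu hlen
      obtain ⟨f', rfl⟩ : ∃ f', f = f' + (qs.length + 1) := ⟨f - (qs.length + 1), by omega⟩
      have hA := loopA_steps d (q :: qs) [] f'
      simp only [List.append_nil, List.nil_append, List.length_cons] at hA
      rw [hA, ih (pvChildren (q :: qs)) f' (by omega) (by omega)]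
      obtain ⟨h1, h2⟩ := levForest_hd_tl d (q :: qs)
      rw [flatten_hd_tl (levForest d (q :: qs)), h1, h2]

-- ===== VERDICT (by name: the statement is the Claim_ definition above) =====
theorem order_for_fast_exploration_spec : Claim_equal_order_for_fast_exploration := by
  intro data _ hpre
  unfold Spec_order_for_fast_exploration order_for_fast_exploration order_for_fast_exploration_alt
  split
  · exact absurd hpre (by unfold Pre_order_for_fast_exploration; omega)
  · simp only []
    rw [loopA_eq_flatten _ (pvMu _) _ _ (le_refl _) (le_refl _)]
    simp [levForest, pvMerge_nil_right]
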